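-- pv_equiv track=rewrite | github.com/adriendoerig/visuo_llm | src/nsd_visuo_semantics/utils/batch_gen.py | give_vector_pos
-- ===== SOURCE A (Python) =====
-- from itertools import permutations
--
-- def give_vector_pos(list_index, m):
--     # takes a pair of indices in the upper tri RDM, and returns the 1D pdist vector index.
--
--     # permutation of length 2
--     perm = permutations(list_index, 2)
--     upper_list_index = []
--     # select valid purmuatations
--     for i in perm:
--         if i[0] < i[1]:
--             upper_list_index.append(i)
--     vector_pos = []
--     # Get the vector positions of the tuples
--     for j in upper_list_index:
--         if j[0] == 0:
--             vector = j[1] - j[0] - 1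
--         else:
--             vector = (int((m*j[0]) - (j[0]*(j[0]+1)/2) + j[1]-j[0]) - 1)
--         vector_pos.append(vector)
--     # Return the sorted vector positions of all possible tuples
--     vector_pos.sort()
--     return vector_pos
-- ===== SOURCE B (Python) =====
-- def give_vector_pos(list_index, m):
--     # Count multiplicities once, walk the sorted distinct values pairwise, hoist the
--     # per-a part of the formula, and emit each position count(a)*count(b) times.
--     counts = {}
--     for x in list_index:
--         counts[x] = counts.get(x, 0) + 1
--     rest = sorted(counts)
--     out = []
--     while rest:
--         a = rest[0]
--         rest = rest[1:]
--         ca = counts[a]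
--         base = (m * a) - (a * (a + 1) / 2)
--         for b in rest:
--             out += [int(base + b - a) - 1] * (ca * counts[b])
--     out.sort()
--     return out
-- ===== Notes on version B (the rewrite author's own statement) =====
-- stated objective: faster
-- what changed: Instead of enumerating all ordered pairs via itertools.permutations and filtering, B counts multiplicities in one pass, iterates over ordered pairs of sorted DISTINCT values with the per-a half of the formula hoisted out of the inner loop, and emits each position count(a)*count(b) times; the redundant a==0 special case is dropped (the formula gives the same value there).
import Mathlib
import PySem

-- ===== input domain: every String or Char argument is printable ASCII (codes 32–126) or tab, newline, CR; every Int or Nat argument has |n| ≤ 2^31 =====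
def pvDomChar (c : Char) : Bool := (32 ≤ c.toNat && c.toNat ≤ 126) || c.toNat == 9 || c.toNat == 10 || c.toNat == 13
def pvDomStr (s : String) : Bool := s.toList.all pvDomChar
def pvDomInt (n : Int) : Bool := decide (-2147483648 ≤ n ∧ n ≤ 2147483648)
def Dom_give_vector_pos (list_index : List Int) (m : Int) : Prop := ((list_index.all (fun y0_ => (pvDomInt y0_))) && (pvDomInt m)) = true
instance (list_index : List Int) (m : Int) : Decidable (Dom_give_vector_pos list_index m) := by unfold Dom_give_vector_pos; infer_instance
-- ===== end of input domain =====

-- B replaces the permutations-enumerate-filter pass by a multiplicity count over sorted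
-- distinct values (objective: faster on duplicate-heavy inputs; the equivalence is about
-- the return value, A mutates nothing observable).
--
-- Both Pythons evaluate `int((m*j0) - (j0*(j0+1)/2) + j1 - j0) - 1` with CPython binary64
-- float arithmetic; every value in that expression is a half-integer, so the shared helper
-- pvF models it exactly: pvRoundHalf N is the nearest double to N/2 (ties to even),
-- returned as its twice-value, which is exact IEEE-754 semantics for this expression.
def pvRoundHalf (N : Int) : Int :=
  if N.natAbs < 2 ^ 53 then N
  else
    let s := PySem.Int.bitLength N - 53
    let p : Int := (2 : Int) ^ s
    let q := PySem.Int.floordiv N p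
    let r := N - q * p
    let half : Int := 2 ^ (s - 1)
    let q' := if half < r ∨ (r = half ∧ PySem.Int.mod q 2 = 1) then q + 1 else q
    q' * p

-- int((m*a) - (a*(a+1)/2) + b - a) - 1, left-associated exactly as in the Python source;
-- ints are converted to doubles at each mixed operation, every result rounded (pvRoundHalf),
-- and int() truncates toward zero (Int.tdiv).
def pvBase (m a : Int) : Int :=
  let t1 := pvRoundHalf (2 * (m * a))
  let t2 := pvRoundHalf (a * (a + 1))
  pvRoundHalf (t1 - t2)

def pvF (m a b : Int) : Int :=
  let t3 := pvBase m a
  let t4 := pvRoundHalf (t3 + 2 * b)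
  let t5 := pvRoundHalf (t4 - 2 * a)
  Int.tdiv t5 2 - 1

-- ===== PORT A =====
def give_vector_pos (list_index : List Int) (m : Int) : List Int :=
  let perm := PySem.List.permutations list_index 2
  let upper_list_index := perm.foldl (fun acc i =>
      if PySem.List.pyGetD i 0 0 < PySem.List.pyGetD i 1 0 then acc ++ [i] else acc) []
  let vector_pos := upper_list_index.foldl (fun acc j =>
      let j0 := PySem.List.pyGetD j 0 0
      let j1 := PySem.List.pyGetD j 1 0
      -- tuple indexing is always in range (length-2 tuples), so the pyGetD default is unused
      if j0 == 0 then acc ++ [j1 - j0 - 1]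
      else acc ++ [pvF m j0 j1]) []
  PySem.List.sorted vector_pos (fun x => x) false

-- ===== PORT B =====
def gvpInner (counts : PySem.Dict Int Int) (m : Int) (a : Int) (out : List Int) (rest : List Int) : List Int :=
  let ca := counts.getD a 0
  let base := pvBase m a
  rest.foldl (fun acc b =>
    acc ++ List.replicate (ca * counts.getD b 0).toNat
      (Int.tdiv (pvRoundHalf (pvRoundHalf (base + 2 * b) - 2 * a)) 2 - 1)) out

def gvpLoop (counts : PySem.Dict Int Int) (m : Int) (out : List Int) : List Int → List Int
  | [] => out
  | a :: rest => gvpLoop counts m (gvpInner counts m a out rest) rest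

def give_vector_pos_alt (list_index : List Int) (m : Int) : List Int :=
  let counts := list_index.foldl (fun d x => d.insert x (d.getD x 0 + 1)) .empty
  let vals := PySem.List.sorted counts.keys (fun x => x) false
  let out := gvpLoop counts m [] vals
  PySem.List.sorted out (fun x => x) false

-- ===== PRECONDITION & SPEC =====
def Spec_give_vector_pos (list_index : List Int) (m : Int) (out : List Int) : Prop := out = give_vector_pos_alt list_index m
instance (list_index : List Int) (m : Int) (out : List Int) : Decidable (Spec_give_vector_pos list_index m out) := by unfold Spec_give_vector_pos; infer_instance

-- ===== CLAIM (what is proved, stated in full; the proofs are below) =====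
def Claim_equal_give_vector_pos : Prop := ∀ (list_index : List Int) (m : Int), Dom_give_vector_pos list_index m → Spec_give_vector_pos list_index m (give_vector_pos list_index m)

-- ===== LEMMAS AND PROOFS =====

-- A's per-pair body, as a function of the doubleton
def pvG (m : Int) (j : List Int) : Int :=
  let j0 := PySem.List.pyGetD j 0 0
  let j1 := PySem.List.pyGetD j 1 0
  if j0 == 0 then j1 - j0 - 1
  else pvF m j0 j1

-- A's permutation stream, with `permutations _ 1` flattened away
def pairsOf (xs : List Int) : List (List Int) :=
  (List.range xs.length).flatMap (fun i => match xs[i]? with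
    | none => []
    | some v => (xs.eraseIdx i).map (fun y => [v, y]))

-- B's pair stream (cnt = multiplicity in the original list)
def pvPB (cnt : Int → Nat) : List Int → List (List Int)
  | [] => []
  | a :: rest => rest.flatMap (fun b => List.replicate (cnt a * cnt b) [a, b]) ++ pvPB cnt rest

theorem perm_succ (xs : List Int) (r : Nat) : PySem.List.permutations xs (r+1) =
    (List.range xs.length).flatMap (fun i => match xs[i]? with
      | none => []
      | some v => (PySem.List.permutations (xs.eraseIdx i) r).map (v :: ·)) := by
  rw [PySem.List.permutations.eq_def]
  apply List.flatMap_congr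
  intro i _
  cases xs[i]? <;> rfl

-- generic range/flatMap collapse
theorem flatMap_range_singleton {β : Type} (xs : List Int) (f : Int → β) :
    (List.range xs.length).flatMap (fun i => match xs[i]? with
      | none => ([] : List β)
      | some v => [f v]) = xs.map f := by
  induction xs with
  | nil => rfl
  | cons x xs ih =>
    simp only [List.length_cons, List.range_succ_eq_map, List.flatMap_cons, List.flatMap_map]
    simp only [List.getElem?_cons_zero, List.getElem?_cons_succ, Nat.succ_eq_add_one]
    rw [List.map_cons, ih]
    rfl

theorem perm_one (xs : List Int) : PySem.List.permutations xs 1 = xs.map (fun y => [y]) := by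
  rw [perm_succ]
  rw [← flatMap_range_singleton xs (fun y => [y])]
  apply List.flatMap_congr
  intro i _
  cases h : xs[i]? <;> rfl

theorem perm_two (xs : List Int) : PySem.List.permutations xs 2 = pairsOf xs := by
  rw [perm_succ, pairsOf]
  apply List.flatMap_congr
  intro i _
  rw [perm_one]
  cases h : xs[i]? with
  | none => rfl
  | some v => simp only [List.map_map]; rfl

theorem pairsOf_cons (x : Int) (xs : List Int) :
    (pairsOf (x :: xs)).Perm
      (xs.map (fun y => [x, y]) ++ (xs.map (fun y => [y, x]) ++ pairsOf xs)) := by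
  have h1 : pairsOf (x :: xs) = xs.map (fun y => [x, y]) ++
      (List.range xs.length).flatMap (fun i =>
        (match xs[i]? with | none => ([] : List (List Int)) | some v => [[v, x]]) ++
        (match xs[i]? with | none => [] | some v => (xs.eraseIdx i).map (fun y => [v, y]))) := by
    unfold pairsOf
    simp only [List.length_cons, List.range_succ_eq_map, List.flatMap_cons, List.flatMap_map]
    congr 1
    apply List.flatMap_congr
    intro i _
    cases h : xs[i]? <;> simp [h]
  rw [h1]
  apply List.Perm.append_left
  have h2 := (List.flatMap_append_perm (List.range xs.length)
      (fun i => (match xs[i]? with | none => ([] : List (List Int)) | some v => [[v, x]]))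
      (fun i => (match xs[i]? with | none => [] | some v => (xs.eraseIdx i).map (fun y => [v, y])))).symm
  refine h2.trans ?_
  rw [flatMap_range_singleton xs (fun v => [v, x])]
  rfl

theorem count_map_pair_left (xs : List Int) (c a b : Int) :
    ((xs.map (fun y => [c, y])).count [a, b]) = if c = a then xs.count b else 0 := by
  induction xs with
  | nil => simp
  | cons x xs ih =>
    simp only [List.map_cons, List.count_cons, ih]
    by_cases hc : c = a <;> by_cases hx : x = b <;> simp [hc, hx]

theorem count_map_pair_right (xs : List Int) (c a b : Int) :
    ((xs.map (fun y => [y, c])).count [a, b]) = if c = b then xs.count a else 0 := by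
  induction xs with
  | nil => simp
  | cons x xs ih =>
    simp only [List.map_cons, List.count_cons, ih]
    by_cases hc : c = b <;> by_cases hx : x = a <;> simp [hc, hx]

theorem count_pairsOf (xs : List Int) (a b : Int) (hab : a ≠ b) :
    (pairsOf xs).count [a, b] = xs.count a * xs.count b := by
  induction xs with
  | nil => simp [pairsOf]
  | cons x xs ih =>
    rw [(pairsOf_cons x xs).count_eq]
    simp only [List.count_append, count_map_pair_left, count_map_pair_right, ih,
      List.count_cons]
    by_cases hx : x = a <;> by_cases hx2 : x = b
    · exact absurd (hx ▸ hx2) hab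
    · simp [hx, hab]; ring
    · simp [hx2, Ne.symm hab]; ring
    · simp [hx, hx2]

theorem mem_pairsOf (xs : List Int) (p : List Int) (hp : p ∈ pairsOf xs) :
    ∃ a b, p = [a, b] := by
  unfold pairsOf at hp
  rw [List.mem_flatMap] at hp
  obtain ⟨i, -, hi⟩ := hp
  cases h : xs[i]? with
  | none => rw [h] at hi; simp at hi
  | some v =>
    rw [h] at hi
    simp only [List.mem_map] at hi
    obtain ⟨y, -, rfl⟩ := hi
    exact ⟨v, y, rfl⟩

theorem mem_pvPB (cnt : Int → Nat) (vals : List Int) (p : List Int) (hp : p ∈ pvPB cnt vals) :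
    ∃ a b, p = [a, b] := by
  induction vals with
  | nil => simp [pvPB] at hp
  | cons a rest ih =>
    rw [pvPB, List.mem_append, List.mem_flatMap] at hp
    rcases hp with ⟨b, -, hb⟩ | hp
    · exact ⟨a, b, (List.eq_of_mem_replicate hb)⟩
    · exact ih hp

theorem count_chunk (cnt : Int → Nat) (rest : List Int) (hnd : rest.Nodup) (c a b : Int) :
    ((rest.flatMap (fun b' => List.replicate (cnt c * cnt b') [c, b'])).count [a, b]) =
      if c = a ∧ b ∈ rest then cnt a * cnt b else 0 := by
  induction rest with
  | nil => simp
  | cons r rest ih =>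
    rw [List.flatMap_cons, List.count_append, ih (List.nodup_cons.mp hnd).2,
      List.count_replicate]
    have hr' : r ∉ rest := (List.nodup_cons.mp hnd).1
    by_cases hc : c = a
    · by_cases hrb : r = b
      · have hbr : b ∉ rest := hrb ▸ hr'
        simp [hc, hrb, hbr, List.mem_cons]
      · have hbr : b = r ↔ False := ⟨fun h => hrb h.symm, False.elim⟩
        simp [hc, hrb, List.mem_cons, hbr]
    · simp [hc, List.mem_cons]

theorem count_pvPB (cnt : Int → Nat) (vals : List Int) (hs : vals.Pairwise (· < ·)) (a b : Int) :
    (pvPB cnt vals).count [a, b] =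
      if a ∈ vals ∧ b ∈ vals ∧ a < b then cnt a * cnt b else 0 := by
  induction vals with
  | nil => simp [pvPB]
  | cons c rest ih =>
    have hlt : ∀ y ∈ rest, c < y := (List.pairwise_cons.mp hs).1
    have hnd : rest.Nodup := ((List.pairwise_cons.mp hs).2).imp (fun h => ne_of_lt h)
    rw [pvPB, List.count_append, count_chunk cnt rest hnd c a b,
      ih (List.pairwise_cons.mp hs).2]
    by_cases hc : c = a
    · subst hc
      have hcr : c ∉ rest := fun h => lt_irrefl c (hlt c h)
      by_cases hb : b ∈ rest
      · rw [if_pos ⟨rfl, hb⟩, if_neg (fun h => hcr h.1),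
          if_pos ⟨List.mem_cons_self, List.mem_cons_of_mem _ hb, hlt b hb⟩]
        omega
      · rw [if_neg (fun h => hb h.2), if_neg (fun h => hb h.2.1), if_neg ?_]
        rintro ⟨-, hb2, hlt2⟩
        rcases List.mem_cons.mp hb2 with h | h
        · exact lt_irrefl c (h ▸ hlt2)
        · exact hb h
    · rw [if_neg (fun h => hc h.1)]
      by_cases hcase : a ∈ rest ∧ b ∈ rest ∧ a < b
      · rw [if_pos hcase,
          if_pos ⟨List.mem_cons_of_mem _ hcase.1, List.mem_cons_of_mem _ hcase.2.1, hcase.2.2⟩]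
        omega
      · rw [if_neg hcase, if_neg ?_]
        rintro ⟨ha, hbb, habl⟩
        have ha' : a ∈ rest := by
          rcases List.mem_cons.mp ha with h | h
          · exact absurd h.symm hc
          · exact h
        rcases List.mem_cons.mp hbb with h | h
        · exact absurd (h ▸ habl) (asymm (hlt a ha'))
        · exact hcase ⟨ha', h, habl⟩

-- the two pair streams are permutations of one another
theorem pairs_perm (l : List Int) :
    ((PySem.List.permutations l 2).filter
        (fun i => decide (PySem.List.pyGetD i 0 0 < PySem.List.pyGetD i 1 0))).Perm
      (pvPB (fun v => l.count v)
        (PySem.List.sorted (PySem.Set.ofList l) (fun x => x) false)) := by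
  rw [perm_two, List.perm_iff_count]
  intro v
  have hpw : (PySem.List.sorted (PySem.Set.ofList l) (fun x => x) false).Pairwise (· < ·) :=
    PySem.List.sorted_ofList_pairwise_lt l
  have hmem : ∀ x : Int, x ∈ PySem.List.sorted (PySem.Set.ofList l) (fun x => x) false ↔ x ∈ l :=
    fun x => (PySem.List.mem_sorted _ _ _ _).trans (PySem.Set.mem_ofList l x)
  have hdub : ∀ p : List Int, (¬ ∃ a b : Int, p = [a, b]) →
      List.count p (List.filter (fun i => decide (PySem.List.pyGetD i 0 0 < PySem.List.pyGetD i 1 0)) (pairsOf l)) = 0 ∧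
      List.count p (pvPB (fun v => l.count v) (PySem.List.sorted (PySem.Set.ofList l) (fun x => x) false)) = 0 := by
    intro p hp
    constructor
    · exact List.count_eq_zero.mpr (fun hmem' => hp (mem_pairsOf l p (List.mem_filter.mp hmem').1))
    · exact List.count_eq_zero.mpr (fun hmem' => hp (mem_pvPB _ _ p hmem'))
  match v with
  | [] => exact (hdub [] (by rintro ⟨a, b, h⟩; simp at h)).1.trans (hdub [] (by rintro ⟨a, b, h⟩; simp at h)).2.symm
  | [a] => exact (hdub [a] (by rintro ⟨x, y, h⟩; simp at h)).1.trans (hdub [a] (by rintro ⟨x, y, h⟩; simp at h)).2.symm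
  | (a :: b :: c :: t) =>
    exact (hdub _ (by rintro ⟨x, y, h⟩; simp at h)).1.trans
      (hdub _ (by rintro ⟨x, y, h⟩; simp at h)).2.symm
  | [a, b] =>
    rw [count_pvPB _ _ hpw]
    by_cases hlt : a < b
    · have hfil : (fun i => decide (PySem.List.pyGetD i 0 0 < PySem.List.pyGetD i 1 0)) [a, b] = true := by
        simp [PySem.List.pyGetD_ofNat', hlt]
      rw [List.count_filter (p := fun i => decide (PySem.List.pyGetD i 0 0 < PySem.List.pyGetD i 1 0))
        (a := [a, b]) (l := pairsOf l) hfil, count_pairsOf l a b (ne_of_lt hlt)]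
      by_cases ha : a ∈ l
      · by_cases hb : b ∈ l
        · rw [if_pos ⟨(hmem a).mpr ha, (hmem b).mpr hb, hlt⟩]
        · rw [List.count_eq_zero.mpr hb]
          rw [if_neg (fun h => hb ((hmem b).mp h.2.1))]
          omega
      · rw [List.count_eq_zero.mpr ha]
        rw [if_neg (fun h => ha ((hmem a).mp h.1))]
        omega
    · rw [if_neg (fun h => hlt h.2.2)]
      refine List.count_eq_zero.mpr (fun hmem' => ?_)
      have := (List.mem_filter.mp hmem').2
      simp [PySem.List.pyGetD_ofNat'] at this
      exact hlt this

theorem pvRoundHalf_small (N : Int) (h : N.natAbs < 2 ^ 53) : pvRoundHalf N = N := by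
  rw [pvRoundHalf, if_pos h]

-- the a == 0 branch of A is redundant: within the 2^31 domain bound the float
-- expression is exact there and int() returns b - 1
theorem pvBase_zero (m : Int) : pvBase m 0 = 0 := by
  unfold pvBase
  norm_num [show pvRoundHalf 0 = 0 from by decide]

theorem pvF_zero (m b : Int) (hb : b.natAbs ≤ 2 ^ 31) : pvF m 0 b = b - 1 := by
  unfold pvF
  rw [pvBase_zero]
  norm_num
  rw [pvRoundHalf_small (2 * b) (by omega), pvRoundHalf_small (2 * b) (by omega)]
  rw [Int.mul_tdiv_cancel_left b (by norm_num)]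

theorem pvG_pair (m a b : Int) (hb : b.natAbs ≤ 2 ^ 31) : pvF m a b = pvG m [a, b] := by
  unfold pvG
  simp only [PySem.List.pyGetD_ofNat', List.getD_cons_zero, List.getD_cons_succ]
  by_cases ha : a = 0
  · subst ha
    rw [if_pos (by simp), pvF_zero m b hb, sub_zero]
  · rw [if_neg (by simpa using ha)]

theorem gvpLoop_eq (counts : PySem.Dict Int Int) (m : Int)
    (h : ∀ v, 0 ≤ counts.getD v 0) (out : List Int) (vals : List Int)
    (hsm : ∀ x ∈ vals, x.natAbs ≤ 2 ^ 31) :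
    gvpLoop counts m out vals =
      out ++ (pvPB (fun v => (counts.getD v 0).toNat) vals).map (pvG m) := by
  induction vals generalizing out with
  | nil => simp [gvpLoop, pvPB]
  | cons a rest ih =>
    rw [gvpLoop, ih _ (fun x hx => hsm x (List.mem_cons_of_mem _ hx)), gvpInner,
      PySem.List.foldl_append_eq_flatMap, List.append_assoc]
    congr 1
    rw [pvPB, List.map_append, List.map_flatMap]
    congr 1
    apply List.flatMap_congr
    intro b hb
    rw [List.map_replicate, ← pvG_pair m a b (hsm b (List.mem_cons_of_mem _ hb))]
    exact congrArg₂ _ (Int.toNat_mul (h a) (h b)) rfl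

-- ===== VERDICT (by name: the statement is the Claim_ definition above) =====
theorem give_vector_pos_spec : Claim_equal_give_vector_pos := by
  intro l m hdom
  have hsm : ∀ x ∈ l, x.natAbs ≤ 2 ^ 31 := by
    intro x hx
    unfold Dom_give_vector_pos at hdom
    rw [Bool.and_eq_true, List.all_eq_true] at hdom
    have := hdom.1 x hx
    simp only [pvDomInt, decide_eq_true_eq] at this
    omega
  unfold Spec_give_vector_pos
  simp only [give_vector_pos, give_vector_pos_alt]
  have hA1 : (fun (acc : List (List Int)) i =>
        if PySem.List.pyGetD i 0 0 < PySem.List.pyGetD i 1 0 then acc ++ [i] else acc)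
      = (fun acc i =>
        if (fun j => decide (PySem.List.pyGetD j 0 0 < PySem.List.pyGetD j 1 0)) i = true
        then acc ++ [id i] else acc) := by
    funext acc i; simp
  rw [hA1, PySem.List.foldl_append_if, List.map_id, List.nil_append]
  have hA2 : (fun (acc : List Int) j =>
        let j0 := PySem.List.pyGetD j 0 0
        let j1 := PySem.List.pyGetD j 1 0
        if j0 == 0 then acc ++ [j1 - j0 - 1]
        else acc ++ [pvF m j0 j1])
      = (fun acc j => acc ++ [pvG m j]) := by
    funext acc j
    simp only [pvG]
    split <;> rfl
  rw [hA2, PySem.List.foldl_append_singleton_eq_map, List.nil_append]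
  have hC : l.foldl (fun d x => d.insert x (d.getD x 0 + 1)) PySem.Dict.empty
      = PySem.Dict.counter l := by
    rw [PySem.Dict.counter_eq_foldl]
    congr 1
  rw [hC, PySem.Dict.keys_counter]
  rw [gvpLoop_eq _ _ (fun v => by rw [PySem.Dict.getD_counter]; exact Int.natCast_nonneg _) _ _
      (fun x hx => hsm x ((PySem.Set.mem_ofList l x).mp ((PySem.List.mem_sorted _ _ _ _).mp hx))),
    List.nil_append]
  have hcnt : (fun v => ((PySem.Dict.counter l).getD v 0).toNat) = fun v : Int => l.count v := by
    funext v
    rw [PySem.Dict.getD_counter, Int.toNat_natCast]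
  rw [hcnt]
  exact PySem.List.sorted_eq_sorted_of_perm _ _ _ (fun _ _ hh => hh)
    ((pairs_perm l).map (pvG m))
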